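-- pv_equiv track=rewrite | github.com/scottstts/JARVIS.py | src/tools/bash/policy.py | _has_recursive_grep_flag
-- ===== SOURCE A (Python) =====
-- _GREP_RECURSIVE_TOKENS = {"-r", "-R", "--recursive"}
--
-- def _has_recursive_grep_flag(args: list[str]) -> bool:
--     for index, token in enumerate(args):
--         if token in _GREP_RECURSIVE_TOKENS:
--             return True
--         if token == "-d" and index + 1 < len(args) and args[index + 1] == "recurse":
--             return True
--         if token.startswith("--directories=") and token.partition("=")[2] == "recurse":
--             return True
--         if token.startswith("-d") and len(token) > 2 and token[2:] == "recurse":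
--             return True
--     return False
-- ===== SOURCE B (Python) =====
-- _GREP_RECURSIVE_TOKENS = {"-r", "-R", "--recursive"}
--
-- _SELF_CONTAINED = _GREP_RECURSIVE_TOKENS | {"--directories=recurse", "-drecurse"}
--
-- def _has_recursive_grep_flag(args: list[str]) -> bool:
--     # Back-to-front pass: walk the reversed list carrying the token that FOLLOWS
--     # the current one in the original order; no indexing, no early return.
--     found = False
--     following = None
--     for token in reversed(args):
--         if token in _SELF_CONTAINED or (token == "-d" and following == "recurse"):
--             found = True
--         following = token
--     return found
-- ===== Notes on version B (the rewrite author's own statement) =====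
-- stated objective: alternative
-- what changed: Replaces A's forward indexed loop with early return and a one-token lookahead plus startswith/partition/slice tests by a back-to-front pass over reversed(args) that carries the following token in an accumulator (so the split '-d recurse' form needs no indexing), with the '--directories=...' and '-dX' tests collapsed to the single exact literal token each accepts.
import Mathlib
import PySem

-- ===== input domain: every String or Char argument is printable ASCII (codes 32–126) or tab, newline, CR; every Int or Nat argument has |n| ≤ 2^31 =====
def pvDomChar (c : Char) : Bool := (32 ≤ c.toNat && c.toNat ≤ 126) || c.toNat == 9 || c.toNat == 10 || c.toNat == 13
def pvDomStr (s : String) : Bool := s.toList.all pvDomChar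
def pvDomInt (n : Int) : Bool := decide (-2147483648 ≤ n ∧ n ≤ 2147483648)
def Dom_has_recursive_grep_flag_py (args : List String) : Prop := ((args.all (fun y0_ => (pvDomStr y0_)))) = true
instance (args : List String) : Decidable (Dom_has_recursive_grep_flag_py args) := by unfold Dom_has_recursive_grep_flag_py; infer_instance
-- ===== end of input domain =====

-- B replaces A's forward indexed loop (early return, index lookahead, startswith/partition/slice
-- tests) by a back-to-front pass over reversed(args) carrying the following token in an
-- accumulator, with the '--directories=...' and '-dX' tests collapsed to exact literal tokens.

-- ===== PORT A =====
-- hand port of str.partition(sep)[2] for a ONE-CHARACTER separator: everything after the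
-- first occurrence of sep, "" when sep is absent — exact for Python's partition("=")[2]
def pvPartAfter (sep : Char) : List Char → List Char
  | [] => []
  | c :: cs => if c = sep then cs else pvPartAfter sep cs

def hrgA_go (args : List String) : List (Int × String) → Bool
  | [] => false
  | (index, token) :: rest =>
    if token = "-r" ∨ token = "-R" ∨ token = "--recursive" then true
    else if token = "-d" ∧ index + 1 < (args.length : Int) ∧
            PySem.List.pyGet? args (index + 1) = some "recurse" then true
    else if PySem.Str.startswith token "--directories=" = true ∧
            pvPartAfter '=' token.toList = "recurse".toList then true
    else if PySem.Str.startswith token "-d" = true ∧ 2 < PySem.Str.len token ∧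
            PySem.Str.slice token (some 2) none = "recurse" then true
    else hrgA_go args rest

def has_recursive_grep_flag_py (args : List String) : Bool :=
  hrgA_go args (PySem.List.enumerate args 0)

-- ===== PORT B =====
def hrgB_single (t : String) : Bool :=
  t == "-r" || t == "-R" || t == "--recursive" || t == "--directories=recurse" || t == "-drecurse"

-- loop body of B: state = (found, following)
def hrgB_step (st : Bool × Option String) (token : String) : Bool × Option String :=
  (st.1 || (hrgB_single token || (token == "-d" && st.2 == some "recurse")), some token)

def has_recursive_grep_flag_py_alt (args : List String) : Bool :=
  (args.reverse.foldl hrgB_step (false, none)).1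

-- ===== PRECONDITION & SPEC =====
def Spec_has_recursive_grep_flag_py (args : List String) (out : Bool) : Prop := out = has_recursive_grep_flag_py_alt args
instance (args : List String) (out : Bool) : Decidable (Spec_has_recursive_grep_flag_py args out) := by unfold Spec_has_recursive_grep_flag_py; infer_instance

-- ===== CLAIM (what is proved, stated in full; the proofs are below) =====
def Claim_equal_has_recursive_grep_flag_py : Prop := ∀ (args : List String), Dom_has_recursive_grep_flag_py args → Spec_has_recursive_grep_flag_py args (has_recursive_grep_flag_py args)

-- ===== LEMMAS AND PROOFS =====

-- the per-index condition A's loop body tests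
def pvCondA (args : List String) (i : Int) (t : String) : Prop :=
  (t = "-r" ∨ t = "-R" ∨ t = "--recursive") ∨
  (t = "-d" ∧ i + 1 < (args.length : Int) ∧
     PySem.List.pyGet? args (i + 1) = some "recurse") ∨
  (PySem.Str.startswith t "--directories=" = true ∧
     pvPartAfter '=' t.toList = "recurse".toList) ∨
  (PySem.Str.startswith t "-d" = true ∧ 2 < PySem.Str.len t ∧
     PySem.Str.slice t (some 2) none = "recurse")

-- the common characterisation both ports are reduced to
def pvEx (args : List String) : Prop :=
  ∃ k, ∃ h : k < args.length,
    (hrgB_single args[k] = true ∨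
      (args[k] = "-d" ∧ ∃ h2 : k + 1 < args.length, args[k + 1] = "recurse"))

set_option maxHeartbeats 1000000 in
theorem hrgA_go_cons (args : List String) (i : Int) (t : String)
    (rest : List (Int × String)) :
    hrgA_go args ((i, t) :: rest) = true ↔
      pvCondA args i t ∨ hrgA_go args rest = true := by
  simp only [hrgA_go]
  unfold pvCondA
  by_cases h1 : t = "-r" ∨ t = "-R" ∨ t = "--recursive"
  · rw [if_pos h1]; exact ⟨fun _ => Or.inl (Or.inl h1), fun _ => rfl⟩
  · rw [if_neg h1]
    by_cases h2 : t = "-d" ∧ i + 1 < (args.length : Int) ∧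
        PySem.List.pyGet? args (i + 1) = some "recurse"
    · rw [if_pos h2]; exact ⟨fun _ => Or.inl (Or.inr (Or.inl h2)), fun _ => rfl⟩
    · rw [if_neg h2]
      by_cases h3 : PySem.Str.startswith t "--directories=" = true ∧
          pvPartAfter '=' t.toList = "recurse".toList
      · rw [if_pos h3]
        exact ⟨fun _ => Or.inl (Or.inr (Or.inr (Or.inl h3))), fun _ => rfl⟩
      · rw [if_neg h3]
        by_cases h4 : PySem.Str.startswith t "-d" = true ∧ 2 < PySem.Str.len t ∧
            PySem.Str.slice t (some 2) none = "recurse"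
        · rw [if_pos h4]
          exact ⟨fun _ => Or.inl (Or.inr (Or.inr (Or.inr h4))), fun _ => rfl⟩
        · rw [if_neg h4]
          constructor
          · exact fun h => Or.inr h
          · rintro ((hc | hc | hc | hc) | h)
            · exact absurd hc h1
            · exact absurd hc h2
            · exact absurd hc h3
            · exact absurd hc h4
            · exact h

theorem hrgA_go_eq_any (args : List String) (l : List (Int × String)) :
    hrgA_go args l = true ↔ ∃ p ∈ l, pvCondA args p.1 p.2 := by
  induction l with
  | nil => simp [hrgA_go]
  | cons p rest ih =>
    obtain ⟨i, t⟩ := p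
    rw [hrgA_go_cons, ih]
    constructor
    · rintro (hc | ⟨q, hq, hcq⟩)
      · exact ⟨(i, t), List.mem_cons_self .., hc⟩
      · exact ⟨q, List.mem_cons_of_mem _ hq, hcq⟩
    · rintro ⟨q, hq, hcq⟩
      rcases List.mem_cons.mp hq with rfl | hq'
      · exact Or.inl hcq
      · exact Or.inr ⟨q, hq', hcq⟩

set_option maxHeartbeats 1000000 in
theorem pvPartAfter_prefix_eq (r : List Char) :
    pvPartAfter '=' ("--directories=".toList ++ r) = r := by
  have h : "--directories=".toList
      = ['-','-','d','i','r','e','c','t','o','r','i','e','s','='] := by decide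
  rw [h]; simp [pvPartAfter]

set_option maxHeartbeats 1000000 in
-- cond 3 of A accepts exactly the one literal token
theorem pvCond3_iff (t : String) :
    (PySem.Str.startswith t "--directories=" = true ∧
       pvPartAfter '=' t.toList = "recurse".toList) ↔ t = "--directories=recurse" := by
  constructor
  · rintro ⟨hs, hp⟩
    rw [PySem.Str.startswith_eq, PySem.Chars.startswith_iff] at hs
    obtain ⟨r, hr⟩ := hs
    rw [← hr, pvPartAfter_prefix_eq] at hp
    subst hp
    have : t.toList = "--directories=recurse".toList := by rw [← hr]; decide
    exact String.toList_injective this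
  · rintro rfl; exact ⟨by decide, by decide⟩

set_option maxHeartbeats 1000000 in
-- cond 4 of A accepts exactly the one literal token
theorem pvCond4_iff (t : String) :
    (PySem.Str.startswith t "-d" = true ∧ 2 < PySem.Str.len t ∧
       PySem.Str.slice t (some 2) none = "recurse") ↔ t = "-drecurse" := by
  constructor
  · rintro ⟨hs, _, hslice⟩
    rw [PySem.Str.startswith_eq, PySem.Chars.startswith_iff] at hs
    obtain ⟨r, hr⟩ := hs
    have hdrop : (PySem.Str.slice t (some 2) none).toList = t.toList.drop 2 := by
      rw [PySem.Str.toList_slice]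
      exact PySem.List.slice_from t.toList (show (0:Int) ≤ 2 by norm_num)
    have hr2 : t.toList.drop 2 = r := by
      rw [← hr]; have : "-d".toList = ['-', 'd'] := by decide
      rw [this]; simp
    have hrec : r = "recurse".toList := by
      rw [← hr2, ← hdrop, hslice]
    have : t.toList = "-drecurse".toList := by
      rw [← hr, hrec]; decide
    exact String.toList_injective this
  · rintro rfl; exact ⟨by decide, by decide, by decide⟩

theorem pvCond2_iff (args : List String) (k : Nat) (t : String) :
    (t = "-d" ∧ (k : Int) + 1 < (args.length : Int) ∧
       PySem.List.pyGet? args ((k : Int) + 1) = some "recurse") ↔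
      (t = "-d" ∧ ∃ h2 : k + 1 < args.length, args[k + 1] = "recurse") := by
  constructor
  · rintro ⟨h1, h2, h3⟩
    have hlt : k + 1 < args.length := by exact_mod_cast h2
    refine ⟨h1, hlt, ?_⟩
    rw [show ((k : Int) + 1 = ((k + 1 : Nat) : Int)) by push_cast; ring,
        PySem.List.pyGet?_natCast] at h3
    rw [List.getElem?_eq_getElem hlt] at h3
    exact Option.some_injective _ h3
  · rintro ⟨h1, hlt, h3⟩
    refine ⟨h1, by exact_mod_cast hlt, ?_⟩
    rw [show ((k : Int) + 1 = ((k + 1 : Nat) : Int)) by push_cast; ring,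
        PySem.List.pyGet?_natCast, List.getElem?_eq_getElem hlt, h3]

-- the single-token part of A (cond 1 ∨ cond 3 ∨ cond 4) is exactly B's literal test
theorem pvSingle_iff (t : String) :
    hrgB_single t = true ↔
      (t = "-r" ∨ t = "-R" ∨ t = "--recursive" ∨
       t = "--directories=recurse" ∨ t = "-drecurse") := by
  simp [hrgB_single, or_assoc]

-- A = true ↔ pvEx
theorem hrgA_iff_ex (args : List String) :
    has_recursive_grep_flag_py args = true ↔ pvEx args := by
  unfold has_recursive_grep_flag_py
  rw [hrgA_go_eq_any]
  constructor
  · rintro ⟨p, hmem, hc⟩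
    rw [PySem.List.mem_enumerate_iff] at hmem
    obtain ⟨k, hk, rfl⟩ := hmem
    unfold pvCondA at hc
    simp only [zero_add] at hc
    refine ⟨k, hk, ?_⟩
    rcases hc with h1 | h2 | h3 | h4
    · exact Or.inl ((pvSingle_iff _).mpr (by tauto))
    · exact Or.inr ((pvCond2_iff args k args[k]).mp h2)
    · exact Or.inl ((pvSingle_iff _).mpr (by right; right; right; left; exact (pvCond3_iff _).mp h3))
    · exact Or.inl ((pvSingle_iff _).mpr (by right; right; right; right; exact (pvCond4_iff _).mp h4))
  · rintro ⟨k, hk, hc⟩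
    refine ⟨(0 + (k : Int), args[k]), ?_, ?_⟩
    · rw [PySem.List.mem_enumerate_iff]; exact ⟨k, hk, rfl⟩
    · show pvCondA args (0 + (k : Int)) args[k]
      unfold pvCondA
      simp only [zero_add]
      rcases hc with hs | hpair
      · rcases (pvSingle_iff _).mp hs with h | h | h | h | h
        · exact Or.inl (Or.inl h)
        · exact Or.inl (Or.inr (Or.inl h))
        · exact Or.inl (Or.inr (Or.inr h))
        · exact Or.inr (Or.inr (Or.inl ((pvCond3_iff _).mpr h)))
        · exact Or.inr (Or.inr (Or.inr ((pvCond4_iff _).mpr h)))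
      · exact Or.inr (Or.inl ((pvCond2_iff args k args[k]).mpr hpair))

-- ----- B side -----

-- the per-token test of B's loop body
def pvP (t : String) (n : Option String) : Bool :=
  hrgB_single t || (t == "-d" && n == some "recurse")

-- the found-flag accumulated by B's loop on the (already reversed) list, given the
-- incoming 'following' value
def pvChain : Option String → List String → Bool
  | _, [] => false
  | n, t :: ts => pvP t n || pvChain (some t) ts

theorem foldl_fst (l : List String) :
    ∀ (b : Bool) (n : Option String),
      (l.foldl hrgB_step (b, n)).1 = (b || pvChain n l) := by
  induction l with
  | nil => intro b n; simp [pvChain]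
  | cons t ts ih =>
    intro b n
    have hstep : hrgB_step (b, n) t = (b || pvP t n, some t) := by
      simp [hrgB_step, pvP]
    simp only [List.foldl_cons, hstep, ih, pvChain, Bool.or_assoc]

theorem chain_append (t : String) :
    ∀ (l : List String) (n : Option String),
      pvChain n (l ++ [t]) = (pvChain n l || pvP t (l.getLast?.or n)) := by
  intro l
  induction l with
  | nil => intro n; simp [pvChain]
  | cons a l' ih =>
    intro n
    have hlast : (a :: l').getLast?.or n = l'.getLast?.or (some a) := by
      cases l' with
      | nil => simp
      | cons b l'' =>
        cases h : (b :: l'').getLast? with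
        | none => exact absurd h (by simp)
        | some x => simp [List.getLast?_cons_cons, h]
    simp only [List.cons_append, pvChain, ih, hlast, Bool.or_assoc]

-- B's pass, re-expressed front-to-back: at each token the 'following' value is the head
-- of the remaining tokens
def pvFrec : List String → Bool
  | [] => false
  | t :: ts => pvFrec ts || pvP t ts.head?

theorem chain_reverse (args : List String) :
    pvChain none args.reverse = pvFrec args := by
  induction args with
  | nil => simp [pvChain, pvFrec]
  | cons t ts ih =>
    have : (t :: ts).reverse = ts.reverse ++ [t] := by simp
    rw [this, chain_append, ih, List.getLast?_reverse, Option.or_none]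
    simp [pvFrec]

theorem frec_iff (args : List String) : pvFrec args = true ↔ pvEx args := by
  induction args with
  | nil => simp [pvFrec, pvEx]
  | cons t ts ih =>
    simp only [pvFrec, Bool.or_eq_true, ih]
    constructor
    · rintro (⟨k, hk, hc⟩ | hp)
      · refine ⟨k + 1, by simpa using Nat.succ_lt_succ hk, ?_⟩
        simpa using hc
      · refine ⟨0, by simp, ?_⟩
        simp only [pvP, Bool.or_eq_true, Bool.and_eq_true, beq_iff_eq] at hp
        rcases hp with hs | ⟨hd, hh⟩
        · exact Or.inl hs
        · cases ts with
          | nil => simp at hh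
          | cons u us =>
            refine Or.inr ⟨hd, by simp, ?_⟩
            simpa using Option.some_injective _ (by simpa using hh)
    · rintro ⟨k, hk, hc⟩
      cases k with
      | zero =>
        right
        simp only [List.getElem_cons_zero] at hc
        simp only [pvP, Bool.or_eq_true, Bool.and_eq_true, beq_iff_eq]
        rcases hc with hs | ⟨hd, h1, hr⟩
        · exact Or.inl hs
        · refine Or.inr ⟨hd, ?_⟩
          cases ts with
          | nil => simp at h1
          | cons u us =>
            have hu : u = "recurse" := by simpa using hr
            simp [hu]
      | succ k =>
        left
        refine ⟨k, by simpa using Nat.lt_of_succ_lt_succ hk, ?_⟩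
        simpa using hc

theorem hrgB_iff_ex (args : List String) :
    has_recursive_grep_flag_py_alt args = true ↔ pvEx args := by
  unfold has_recursive_grep_flag_py_alt
  rw [foldl_fst, Bool.false_or, chain_reverse, frec_iff]

-- ===== VERDICT (by name: the statement is the Claim_ definition above) =====
theorem has_recursive_grep_flag_py_spec : Claim_equal_has_recursive_grep_flag_py := by
  intro args _
  unfold Spec_has_recursive_grep_flag_py
  rw [Bool.eq_iff_iff, hrgA_iff_ex, hrgB_iff_ex]
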